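-- pv_equiv track=rewrite | github.com/ric2b/confidential-debt-simplification | main_server/main_server_app/services/simplify_debt.py | debt_simplification
-- ===== SOURCE A (Python) =====
-- from collections import defaultdict
--
-- def debt_simplification(borrowers: dict, lenders: dict) -> dict:
--     """
--     Inputs are two dictionaries containing borrowers and lenders.
--     The output is a list of simplified UOMe {lender, borrower, value}
--     """
--
--     simplified_debt = defaultdict(dict)
--     for lender in sorted(lenders):
--         for borrower in sorted(borrowers):
--             credit, debit = lenders[lender], borrowers[borrower]
--
--             if credit != 0 and debit != 0:
--                 transaction_value = min(credit, debit)
--                 simplified_debt[borrower][lender] = transaction_value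
--
--                 if lenders[lender] >= borrowers[borrower]:
--                     lenders[lender] -= transaction_value
--                     borrowers[borrower] = 0
--                 else:
--                     lenders[lender] = 0
--                     borrowers[borrower] -= transaction_value
--
--     return dict(simplified_debt)
-- ===== SOURCE B (Python) =====
-- def debt_simplification(borrowers: dict, lenders: dict) -> dict:
--     """
--     Two-pointer sweep over key-sorted borrowers and lenders.
--     Unlike the original, does not mutate its arguments; same return value.
--     """
--     bs = sorted(borrowers.items(), key=lambda kv: kv[0])
--     ls = sorted(lenders.items(), key=lambda kv: kv[0])
--     result = {}
--     j = 0
--     credit = ls[0][1] if 0 < len(ls) else 0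
--     for name, debit in bs:
--         entries = {}
--         while debit != 0 and j < len(ls):
--             if credit == 0:
--                 j += 1
--                 if j < len(ls):
--                     credit = ls[j][1]
--             else:
--                 value = min(credit, debit)
--                 entries[ls[j][0]] = value
--                 if credit >= debit:
--                     credit -= value
--                     debit = 0
--                 else:
--                     credit = 0
--                     debit -= value
--         if len(entries) != 0:
--             result[name] = entries
--     return result
-- ===== Notes on version B (the rewrite author's own statement) =====
-- stated objective: faster
-- what changed: A rescans every borrower for every lender over mutable dicts (nested loops); B sorts both item lists once and runs a single two-pointer sweep, advancing whichever side is exhausted, so the inner rescans disappear.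
import Mathlib
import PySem

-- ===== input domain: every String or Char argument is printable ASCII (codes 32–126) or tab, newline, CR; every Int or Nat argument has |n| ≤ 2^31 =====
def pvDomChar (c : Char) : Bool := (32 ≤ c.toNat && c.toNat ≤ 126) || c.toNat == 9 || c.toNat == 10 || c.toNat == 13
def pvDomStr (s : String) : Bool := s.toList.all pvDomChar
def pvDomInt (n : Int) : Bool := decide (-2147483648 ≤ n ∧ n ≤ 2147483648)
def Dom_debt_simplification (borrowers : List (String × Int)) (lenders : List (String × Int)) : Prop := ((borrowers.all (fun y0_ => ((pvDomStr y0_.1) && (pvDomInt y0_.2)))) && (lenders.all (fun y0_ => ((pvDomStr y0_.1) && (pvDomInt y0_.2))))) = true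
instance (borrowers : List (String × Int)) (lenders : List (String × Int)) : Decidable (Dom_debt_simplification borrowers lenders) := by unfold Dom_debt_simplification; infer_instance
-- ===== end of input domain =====

-- B replaces A's nested lender×borrower rescans by a two-pointer sweep over the two
-- key-sorted item lists (objective: faster). A mutates its dict arguments in place;
-- B does not — the equivalence proved here is about the return value only.

-- ===== PORT A =====
-- one inner-loop iteration: body of "for borrower in sorted(borrowers)"
-- (state = (lenders, borrowers, simplified_debt); the lookups lenders[lender] /
-- borrowers[borrower] never raise — the keys come from the dicts themselves —
-- so getD's default 0 is never consulted)
def pvAInner (lender : String)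
    (st : PySem.Dict String Int × PySem.Dict String Int × PySem.Dict String (PySem.Dict String Int))
    (borrower : String) :
    PySem.Dict String Int × PySem.Dict String Int × PySem.Dict String (PySem.Dict String Int) :=
  let lend := st.1
  let borr := st.2.1
  let sd := st.2.2
  let credit := lend.getD lender 0
  let debit := borr.getD borrower 0
  if credit ≠ 0 ∧ debit ≠ 0 then
    let tv := min credit debit
    let sd' := sd.modify borrower PySem.Dict.empty (fun inner => inner.insert lender tv)
    if credit ≥ debit then
      (lend.insert lender (credit - tv), borr.insert borrower 0, sd')
    else
      (lend.insert lender 0, borr.insert borrower (debit - tv), sd')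
  else (lend, borr, sd)

def debt_simplification (borrowers : List (String × Int)) (lenders : List (String × Int)) :
    List (String × List (String × Int)) :=
  let borrD := PySem.Dict.ofList borrowers
  let lendD := PySem.Dict.ofList lenders
  let fin :=
    (PySem.List.sorted lendD.keys (fun k => k) false).foldl
      (fun st lender =>
        (PySem.List.sorted st.2.1.keys (fun k => k) false).foldl (pvAInner lender) st)
      (lendD, borrD, (PySem.Dict.empty : PySem.Dict String (PySem.Dict String Int)))
  fin.2.2.items.map (fun p => (p.1, p.2.items))

-- ===== PORT B =====
-- the "while debit != 0 and j < len(ls)" loop of Source B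
def pvPay (ls : List (String × Int)) (j : Nat) (credit debit : Int)
    (entries : PySem.Dict String Int) : PySem.Dict String Int × Nat × Int :=
  if h : debit ≠ 0 ∧ j < ls.length then
    if hc : credit = 0 then
      let j' := j + 1
      let credit' := if h2 : j' < ls.length then (ls[j']'h2).2 else credit
      pvPay ls j' credit' debit entries
    else
      let value := min credit debit
      let entries' := entries.insert (ls[j]'h.2).1 value
      if credit ≥ debit then (entries', j, credit - value)
      else pvPay ls j 0 (debit - value) entries'
  else (entries, j, credit)
termination_by 2 * (ls.length - j) + (if credit = 0 then 0 else 1)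
decreasing_by
  · have _hj := h.2
    rw [if_pos hc]
    split <;> (try split) <;> omega
  · rw [if_neg hc]
    simp

def debt_simplification_alt (borrowers : List (String × Int)) (lenders : List (String × Int)) :
    List (String × List (String × Int)) :=
  let bs := PySem.List.sorted (PySem.Dict.ofList borrowers).items (fun kv => kv.1) false
  let ls := PySem.List.sorted (PySem.Dict.ofList lenders).items (fun kv => kv.1) false
  let credit0 : Int := if h : 0 < ls.length then (ls[0]'h).2 else 0
  let fin :=
    bs.foldl
      (fun (st : PySem.Dict String (PySem.Dict String Int) × Nat × Int) nd =>
        let r := pvPay ls st.2.1 st.2.2 nd.2 PySem.Dict.empty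
        (if r.1.size ≠ 0 then st.1.insert nd.1 r.1 else st.1, r.2))
      ((PySem.Dict.empty : PySem.Dict String (PySem.Dict String Int)), 0, credit0)
  fin.1.items.map (fun p => (p.1, p.2.items))

-- ===== PRECONDITION & SPEC =====
def Spec_debt_simplification (borrowers : List (String × Int)) (lenders : List (String × Int)) (out : List (String × List (String × Int))) : Prop := out = debt_simplification_alt borrowers lenders
instance (borrowers : List (String × Int)) (lenders : List (String × Int)) (out : List (String × List (String × Int))) : Decidable (Spec_debt_simplification borrowers lenders out) := by unfold Spec_debt_simplification; infer_instance

-- ===== CLAIM (what is proved, stated in full; the proofs are below) =====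
def Claim_equal_debt_simplification : Prop := ∀ (borrowers : List (String × Int)) (lenders : List (String × Int)), Dom_debt_simplification borrowers lenders → Spec_debt_simplification borrowers lenders (debt_simplification borrowers lenders)

-- ===== LEMMAS AND PROOFS =====

-- ---- proof-level pure-list mirrors of the two algorithms ----

-- one lender (credit c) scanning the borrower list: (entries, updated borrowers, remaining credit)
def pvScan (c : Int) : List (String × Int) → List (String × Int) × List (String × Int) × Int
  | [] => ([], [], c)
  | (b, d) :: bs =>
    if c ≠ 0 ∧ d ≠ 0 then
      if c ≥ d then
        let r := pvScan (c - min c d) bs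
        ((b, min c d) :: r.1, (b, 0) :: r.2.1, r.2.2)
      else ([(b, min c d)], (b, d - min c d) :: bs, 0)
    else
      let r := pvScan c bs
      (r.1, (b, d) :: r.2.1, r.2.2)

-- A's flat transaction list (lender-major)
def pvAlist : List (String × Int) → List (String × Int) → List (String × String × Int)
  | _, [] => []
  | bs, (l, c) :: ls =>
    let r := pvScan c bs
    r.1.map (fun p => (p.1, l, p.2)) ++ pvAlist r.2.1 ls

-- one borrower (debit d) consuming the lender list: (entries, remaining lenders, remaining debit)
def pvPayL (d : Int) : List (String × Int) → List (String × Int) × List (String × Int) × Int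
  | [] => ([], [], d)
  | (l, c) :: ls =>
    if d = 0 then ([], (l, c) :: ls, d)
    else if c = 0 then pvPayL d ls
    else
      if c ≥ d then ([(l, min c d)], (l, c - min c d) :: ls, 0)
      else
        let r := pvPayL (d - min c d) ls
        ((l, min c d) :: r.1, r.2.1, r.2.2)

-- the sweep (borrower-major), already grouped
def pvSweep : List (String × Int) → List (String × Int) → List (String × List (String × Int))
  | [], _ => []
  | (b, d) :: bs, ls =>
    let r := pvPayL d ls
    if r.1 = [] then pvSweep bs r.2.1 else (b, r.1) :: pvSweep bs r.2.1

-- grouping of consecutive equal borrowers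
def pvIns (b : String) (e : String × Int) (G : List (String × List (String × Int))) :
    List (String × List (String × Int)) :=
  match G with
  | (b', es) :: g => if b' = b then (b, e :: es) :: g else (b, [e]) :: (b', es) :: g
  | [] => [(b, [e])]

def pvGroup : List (String × String × Int) → List (String × List (String × Int))
  | [] => []
  | (b, l, v) :: rest => pvIns b (l, v) (pvGroup rest)

def pvFlat (g : List (String × List (String × Int))) : List (String × String × Int) :=
  g.flatMap (fun q => q.2.map (fun p => (q.1, p.1, p.2)))

-- the simplified_debt update for one transaction
def pvMod (sd : PySem.Dict String (PySem.Dict String Int)) (t : String × String × Int) :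
    PySem.Dict String (PySem.Dict String Int) :=
  sd.modify t.1 PySem.Dict.empty (fun inner => inner.insert t.2.1 t.2.2)

-- B's current lender list as seen through (j, credit)
def pvCur (ls : List (String × Int)) (j : Nat) (c : Int) : List (String × Int) :=
  match ls[j]? with
  | some p => (p.1, c) :: ls.drop (j + 1)
  | none => []

-- ---- basic facts about the mirrors ----

theorem pvScan_keys (c : Int) (bs : List (String × Int)) :
    ((pvScan c bs).2.1).map Prod.fst = bs.map Prod.fst := by
  induction bs generalizing c with
  | nil => simp [pvScan]
  | cons hd tl ih =>
    obtain ⟨b, d⟩ := hd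
    simp only [pvScan]
    split
    · split
      · simpa using ih (c - min c d)
      · simp
    · simpa using ih c

theorem pvScan_es_keys (c : Int) (bs : List (String × Int)) :
    ((pvScan c bs).1).map Prod.fst |>.Sublist (bs.map Prod.fst) := by
  induction bs generalizing c with
  | nil => simp [pvScan]
  | cons hd tl ih =>
    obtain ⟨b, d⟩ := hd
    simp only [pvScan]
    split
    · split
      · simpa using List.Sublist.cons₂ b (ih (c - min c d))
      · simp
    · simpa using List.Sublist.cons b (ih c)

theorem pvAlist_nil (ls : List (String × Int)) : pvAlist [] ls = [] := by
  induction ls with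
  | nil => rfl
  | cons hd tl ih => obtain ⟨l, c⟩ := hd; simp [pvAlist, pvScan, ih]

theorem pvAlist_mem (bs ls : List (String × Int)) (t : String × String × Int)
    (ht : t ∈ pvAlist bs ls) : t.1 ∈ bs.map Prod.fst := by
  induction ls generalizing bs with
  | nil => simp [pvAlist] at ht
  | cons hd tl ih =>
    obtain ⟨l, c⟩ := hd
    simp only [pvAlist, List.mem_append, List.mem_map] at ht
    rcases ht with ⟨p, hp, hpt⟩ | ht
    · have : p.1 ∈ (pvScan c bs).1.map Prod.fst := List.mem_map_of_mem hp
      have := (pvScan_es_keys c bs).mem this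
      subst hpt; simpa using this
    · have := ih _ ht
      rwa [pvScan_keys] at this

theorem pvScan_zero (bs : List (String × Int)) : pvScan 0 bs = ([], bs, 0) := by
  induction bs with
  | nil => rfl
  | cons hd tl ih => obtain ⟨b, d⟩ := hd; simp [pvScan, ih]

theorem pvAlist_zero_head (b : String) (bs ls : List (String × Int)) :
    pvAlist ((b, 0) :: bs) ls = pvAlist bs ls := by
  induction ls generalizing bs with
  | nil => rfl
  | cons hd tl ih =>
    obtain ⟨l, c⟩ := hd
    have hscan : pvScan c ((b, 0) :: bs) =
        ((pvScan c bs).1, (b, 0) :: (pvScan c bs).2.1, (pvScan c bs).2.2) := by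
      simp [pvScan]
    simp only [pvAlist, hscan]
    rw [ih]

theorem pvGroup_mem_keys (X : List (String × String × Int)) (q : String × List (String × Int))
    (hq : q ∈ pvGroup X) : q.1 ∈ X.map (fun t => t.1) := by
  induction X with
  | nil => simp [pvGroup] at hq
  | cons hd tl ih =>
    obtain ⟨b, l, v⟩ := hd
    simp only [pvGroup] at hq
    rcases hg : pvGroup tl with _ | ⟨⟨b', es⟩, g⟩
    · rw [hg] at hq
      simp [pvIns] at hq
      simp [hq]
    · rw [hg] at hq
      by_cases hbb : b' = b
      · rw [show pvIns b (l, v) ((b', es) :: g) = (b, (l, v) :: es) :: g by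
          simp [pvIns, hbb]] at hq
        rcases List.mem_cons.mp hq with h1 | h2
        · simp [h1]
        · have : q ∈ pvGroup tl := by rw [hg]; exact List.mem_cons_of_mem _ h2
          exact List.mem_cons_of_mem _ (ih this)
      · rw [show pvIns b (l, v) ((b', es) :: g) = (b, [(l, v)]) :: (b', es) :: g by
          simp [pvIns, hbb]] at hq
        rcases List.mem_cons.mp hq with h1 | h2
        · simp [h1]
        · have : q ∈ pvGroup tl := by rw [hg]; exact h2
          exact List.mem_cons_of_mem _ (ih this)

theorem pvFlat_group (X : List (String × String × Int)) : pvFlat (pvGroup X) = X := by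
  induction X with
  | nil => rfl
  | cons hd tl ih =>
    obtain ⟨b, l, v⟩ := hd
    simp only [pvGroup]
    rcases hg : pvGroup tl with _ | ⟨⟨b', es⟩, g⟩
    · rw [hg] at ih
      simp [pvFlat, pvIns] at ih ⊢
      simp [← ih]
    · rw [hg] at ih
      by_cases hbb : b' = b
      · subst hbb
        rw [show pvIns b' (l, v) ((b', es) :: g) = (b', (l, v) :: es) :: g by simp [pvIns]]
        simp only [pvFlat, List.flatMap_cons] at ih ⊢
        simpa using ih
      · rw [show pvIns b (l, v) ((b', es) :: g) = (b, [(l, v)]) :: (b', es) :: g by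
          simp [pvIns, hbb]]
        simp only [pvFlat, List.flatMap_cons] at ih ⊢
        simpa using ih

theorem pvPayL_es_keys (d : Int) (ls : List (String × Int)) :
    ((pvPayL d ls).1).map Prod.fst |>.Sublist (ls.map Prod.fst) := by
  induction ls generalizing d with
  | nil => simp [pvPayL]
  | cons hd tl ih =>
    obtain ⟨l, c⟩ := hd
    simp only [pvPayL]
    split
    · simp
    · split
      · simpa using List.Sublist.cons l (ih d)
      · split
        · simp
        · simpa using List.Sublist.cons₂ l (ih _)

theorem pvPayL_rest_keys (d : Int) (ls : List (String × Int)) :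
    ((pvPayL d ls).2.1).map Prod.fst |>.Sublist (ls.map Prod.fst) := by
  induction ls generalizing d with
  | nil => simp [pvPayL]
  | cons hd tl ih =>
    obtain ⟨l, c⟩ := hd
    simp only [pvPayL]
    split
    · simp
    · split
      · simpa using List.Sublist.cons l (ih d)
      · split
        · simp
        · simpa using List.Sublist.cons l (ih _)

theorem pvSweep_keys (bs ls : List (String × Int)) :
    (pvSweep bs ls).map Prod.fst |>.Sublist (bs.map Prod.fst) := by
  induction bs generalizing ls with
  | nil => simp [pvSweep]
  | cons hd tl ih =>
    obtain ⟨b, d⟩ := hd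
    simp only [pvSweep]
    split
    · simpa using List.Sublist.cons b (ih _)
    · simpa using List.Sublist.cons₂ b (ih _)

theorem pvSweep_groups (bs ls : List (String × Int)) (hl : (ls.map Prod.fst).Nodup)
    (q : String × List (String × Int)) (hq : q ∈ pvSweep bs ls) :
    q.2 ≠ [] ∧ (q.2.map Prod.fst).Nodup := by
  induction bs generalizing ls with
  | nil => simp [pvSweep] at hq
  | cons hd tl ih =>
    obtain ⟨b, d⟩ := hd
    simp only [pvSweep] at hq
    have hrest : ((pvPayL d ls).2.1.map Prod.fst).Nodup :=
      (pvPayL_rest_keys d ls).nodup hl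
    split at hq
    · exact ih _ hrest hq
    · rcases List.mem_cons.mp hq with h1 | h2
      · subst h1
        refine ⟨by assumption, (pvPayL_es_keys d ls).nodup hl⟩
      · exact ih _ hrest h2

theorem pvSweep_nil_right (bs : List (String × Int)) : pvSweep bs [] = [] := by
  induction bs with
  | nil => rfl
  | cons hd tl ih => obtain ⟨b, d⟩ := hd; simp [pvSweep, pvPayL, ih]

theorem pvGroup_cons_new (b l : String) (v : Int) (X : List (String × String × Int))
    (h : ∀ q ∈ pvGroup X, q.1 ≠ b) :
    pvGroup ((b, l, v) :: X) = (b, [(l, v)]) :: pvGroup X := by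
  simp only [pvGroup]
  rcases hg : pvGroup X with _ | ⟨⟨b', es⟩, g⟩
  · simp [pvIns]
  · have hb : b' ≠ b := h (b', es) (by rw [hg]; exact List.mem_cons_self ..)
    simp [pvIns, hb]

theorem pvGroup_cons_same (b l : String) (v : Int) (X : List (String × String × Int))
    (es : List (String × Int)) (g : List (String × List (String × Int)))
    (h : pvGroup X = (b, es) :: g) :
    pvGroup ((b, l, v) :: X) = (b, (l, v) :: es) :: g := by
  simp [pvGroup, h, pvIns]

-- ---- the combinatorial heart: lender-major grouped = borrower-major sweep ----

theorem pvMain (n : Nat) : ∀ (bs ls : List (String × Int)), bs.length + ls.length ≤ n →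
    (bs.map Prod.fst).Nodup → pvGroup (pvAlist bs ls) = pvSweep bs ls := by
  induction n with
  | zero =>
    intro bs ls hlen _
    have hbs : bs = [] := by cases bs <;> simp_all
    subst hbs
    rw [pvAlist_nil]
    simp [pvGroup, pvSweep]
  | succ n ih =>
    intro bs ls hlen hnd
    rcases bs with _ | ⟨⟨b, d⟩, bs'⟩
    · rw [pvAlist_nil]; simp [pvGroup, pvSweep]
    rcases ls with _ | ⟨⟨l, c⟩, ls'⟩
    · rw [pvSweep_nil_right]; rfl
    have hnds : (b :: bs'.map Prod.fst).Nodup := by simpa using hnd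
    have hnd' : (bs'.map Prod.fst).Nodup := (List.nodup_cons.mp hnds).2
    have hbnotin : b ∉ bs'.map Prod.fst := (List.nodup_cons.mp hnds).1
    by_cases hd : d = 0
    · subst hd
      rw [pvAlist_zero_head]
      have hsw : pvSweep ((b, (0:Int)) :: bs') ((l, c) :: ls') = pvSweep bs' ((l, c) :: ls') := by
        simp [pvSweep, pvPayL]
      rw [hsw]
      exact ih bs' ((l, c) :: ls') (by simp at hlen ⊢; omega) hnd'
    by_cases hc : c = 0
    · subst hc
      have h1 : pvAlist ((b, d) :: bs') ((l, (0:Int)) :: ls') = pvAlist ((b, d) :: bs') ls' := by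
        simp [pvAlist, pvScan_zero]
      have h2 : pvSweep ((b, d) :: bs') ((l, (0:Int)) :: ls') = pvSweep ((b, d) :: bs') ls' := by
        simp [pvSweep, pvPayL, hd]
      rw [h1, h2]
      exact ih _ _ (by simp at hlen ⊢; omega) hnd
    by_cases hge : c ≥ d
    · -- borrower dies
      have hscan : pvScan c ((b, d) :: bs') =
          ((b, min c d) :: (pvScan (c - min c d) bs').1,
           (b, 0) :: (pvScan (c - min c d) bs').2.1,
           (pvScan (c - min c d) bs').2.2) := by
        simp [pvScan, hd, hc, hge]
      have hflat : pvAlist ((b, d) :: bs') ((l, c) :: ls') =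
          (b, l, min c d) :: pvAlist bs' ((l, c - min c d) :: ls') := by
        simp only [pvAlist, hscan, List.map_cons, List.cons_append]
        rw [pvAlist_zero_head]
      have hih : pvGroup (pvAlist bs' ((l, c - min c d) :: ls')) =
          pvSweep bs' ((l, c - min c d) :: ls') :=
        ih _ _ (by simp at hlen ⊢; omega) hnd'
      have hnew : ∀ q ∈ pvGroup (pvAlist bs' ((l, c - min c d) :: ls')), q.1 ≠ b := by
        intro q hq
        rcases List.mem_map.mp (pvGroup_mem_keys _ _ hq) with ⟨t, ht, hteq⟩
        have hmem := pvAlist_mem _ _ _ ht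
        intro hqb
        rw [hteq, hqb] at hmem
        exact hbnotin hmem
      rw [hflat, pvGroup_cons_new _ _ _ _ hnew, hih]
      have hpay : pvPayL d ((l, c) :: ls') =
          ([(l, min c d)], (l, c - min c d) :: ls', 0) := by
        simp [pvPayL, hd, hc, hge]
      simp [pvSweep, hpay]
    · -- lender dies
      have hscan : pvScan c ((b, d) :: bs') =
          ([(b, min c d)], (b, d - min c d) :: bs', 0) := by
        simp [pvScan, hd, hc, hge]
      have hflat : pvAlist ((b, d) :: bs') ((l, c) :: ls') =
          (b, l, min c d) :: pvAlist ((b, d - min c d) :: bs') ls' := by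
        simp [pvAlist, hscan]
      have hih : pvGroup (pvAlist ((b, d - min c d) :: bs') ls') =
          pvSweep ((b, d - min c d) :: bs') ls' :=
        ih _ _ (by simp at hlen ⊢; omega) (by simpa using hnd)
      have hpay : pvPayL d ((l, c) :: ls') =
          ((l, min c d) :: (pvPayL (d - min c d) ls').1,
           (pvPayL (d - min c d) ls').2.1,
           (pvPayL (d - min c d) ls').2.2) := by
        simp [pvPayL, hd, hc, hge]
      rw [hflat]
      rcases hre : (pvPayL (d - min c d) ls').1 with _ | ⟨e0, es0⟩
      · have hXg : pvGroup (pvAlist ((b, d - min c d) :: bs') ls') =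
            pvSweep bs' (pvPayL (d - min c d) ls').2.1 := by
          rw [hih]; simp [pvSweep, hre]
        have hnew : ∀ q ∈ pvGroup (pvAlist ((b, d - min c d) :: bs') ls'), q.1 ≠ b := by
          rw [hXg]
          intro q hq hqb
          have hmem : q.1 ∈ (pvSweep bs' (pvPayL (d - min c d) ls').2.1).map Prod.fst :=
            List.mem_map_of_mem hq
          have := (pvSweep_keys _ _).subset hmem
          rw [hqb] at this
          exact hbnotin this
        rw [pvGroup_cons_new _ _ _ _ hnew, hXg]
        simp [pvSweep, hpay, hre]
      · have hXg : pvGroup (pvAlist ((b, d - min c d) :: bs') ls') =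
            (b, e0 :: es0) :: pvSweep bs' (pvPayL (d - min c d) ls').2.1 := by
          rw [hih]; simp [pvSweep, hre]
        rw [pvGroup_cons_same _ _ _ _ _ _ hXg]
        simp [pvSweep, hpay, hre]

theorem pvAlist_eq_flat_sweep (bs ls : List (String × Int)) (hb : (bs.map Prod.fst).Nodup) :
    pvAlist bs ls = pvFlat (pvSweep bs ls) := by
  have hm := pvMain (bs.length + ls.length) bs ls le_rfl hb
  calc pvAlist bs ls = pvFlat (pvGroup (pvAlist bs ls)) := (pvFlat_group _).symm
    _ = pvFlat (pvSweep bs ls) := by rw [hm]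

-- ---- rendering the flat transaction list into the nested dict (A's simplified_debt) ----

theorem pvChunk_fold (b : String) (es : List (String × Int)) :
    ∀ (sd : PySem.Dict String (PySem.Dict String Int)) (pre : List (String × PySem.Dict String Int))
      (inner : PySem.Dict String Int),
      sd.items = pre ++ [(b, inner)] → sd.keys.Nodup →
      ((es.map (fun p => (b, p.1, p.2))).foldl pvMod sd).items =
        pre ++ [(b, es.foldl (fun dd p => dd.insert p.1 p.2) inner)]
      ∧ ((es.map (fun p => (b, p.1, p.2))).foldl pvMod sd).keys = sd.keys := by
  induction es with
  | nil => intro sd pre inner hit _; exact ⟨by simpa using hit, rfl⟩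
  | cons e es' ih =>
    intro sd pre inner hit hnd
    obtain ⟨x, w⟩ := e
    have hkeys : sd.keys = pre.map Prod.fst ++ [b] := by
      simp [PySem.Dict.keys, hit]
    have hcont : sd.contains b = true := by
      rw [PySem.Dict.contains_iff_mem_keys, hkeys]; simp
    have hget : sd.getD b PySem.Dict.empty = inner :=
      PySem.Dict.getD_of_mem_items sd (by rw [hit]; simp) hnd _
    have hpre : ∀ p ∈ pre, p.1 ≠ b := by
      intro p hp
      have hnd2 := hnd
      rw [hkeys] at hnd2
      exact (List.nodup_append.mp hnd2).2.2 p.1 (List.mem_map_of_mem hp) b (by simp)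
    have hstep : (pvMod sd (b, x, w)).items = pre ++ [(b, inner.insert x w)] := by
      simp only [pvMod, PySem.Dict.modify]
      rw [hget, PySem.Dict.items_insert_of_contains _ _ hcont, hit]
      rw [List.map_append]
      congr 1
      · calc pre.map (fun p => if (p.1 == b) = true then (b, inner.insert x w) else p)
            = pre.map id := List.map_congr_left (fun p hp => by simp [hpre p hp])
          _ = pre := List.map_id _
      · simp
    have hkstep : (pvMod sd (b, x, w)).keys = sd.keys := by
      simp only [pvMod, PySem.Dict.modify]
      rw [hget, PySem.Dict.keys_insert_of_contains _ _ hcont]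
    have hnd1 : (pvMod sd (b, x, w)).keys.Nodup := by rw [hkstep]; exact hnd
    obtain ⟨hi, hk⟩ := ih (pvMod sd (b, x, w)) pre (inner.insert x w) hstep hnd1
    constructor
    · simpa [List.foldl_cons] using hi
    · calc ((((x, w) :: es').map (fun p => (b, p.1, p.2))).foldl pvMod sd).keys
          = ((es'.map (fun p => (b, p.1, p.2))).foldl pvMod (pvMod sd (b, x, w))).keys := by
            simp [List.foldl_cons]
        _ = sd.keys := by rw [hk, hkstep]

theorem pvContains_false_iff {ν : Type} (d : PySem.Dict String ν) (k : String) :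
    d.contains k = false ↔ k ∉ d.keys := by
  rw [← PySem.Dict.contains_iff_mem_keys]
  cases h : d.contains k <;> simp

theorem pvContains_of_getD_ne (d : PySem.Dict String Int) (k : String)
    (h : d.getD k 0 ≠ 0) : d.contains k = true := by
  cases hc : d.contains k
  · exact absurd (PySem.Dict.getD_of_not_contains d 0 hc) h
  · rfl

theorem pvEmptyItems : (PySem.Dict.empty : PySem.Dict String (PySem.Dict String Int)).items = [] :=
  rfl

theorem pvModFold_items (G : List (String × List (String × Int))) :
    ∀ (sd : PySem.Dict String (PySem.Dict String Int)),
      (∀ q ∈ G, q.2 ≠ [] ∧ (q.2.map Prod.fst).Nodup) →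
      (∀ q ∈ G, sd.contains q.1 = false) → (G.map Prod.fst).Nodup → sd.keys.Nodup →
      ((pvFlat G).foldl pvMod sd).items.map (fun p => (p.1, p.2.items)) =
        sd.items.map (fun p => (p.1, p.2.items)) ++ G := by
  induction G with
  | nil => intro sd _ _ _ _; simp [pvFlat]
  | cons q G' ih =>
    obtain ⟨b, es⟩ := q
    intro sd hgr hfresh hnd hknd
    obtain ⟨hne, hesnd⟩ := hgr _ (List.mem_cons_self ..)
    rcases hes : es with _ | ⟨⟨x, w⟩, es'⟩
    · exact absurd hes hne
    subst hes
    have hcont : sd.contains b = false := hfresh _ (List.mem_cons_self ..)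
    have hget : sd.getD b PySem.Dict.empty = PySem.Dict.empty :=
      PySem.Dict.getD_of_not_contains sd _ hcont
    have hstep : (pvMod sd (b, x, w)).items = sd.items ++ [(b, PySem.Dict.empty.insert x w)] := by
      simp only [pvMod, PySem.Dict.modify]
      rw [hget, PySem.Dict.items_insert_of_not_contains _ _ hcont]
    have hkstep : (pvMod sd (b, x, w)).keys = sd.keys ++ [b] := by
      simp only [pvMod, PySem.Dict.modify]
      rw [hget, PySem.Dict.keys_insert_of_not_contains _ _ hcont]
    have hbnot : b ∉ sd.keys := (pvContains_false_iff sd b).mp hcont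
    have hknd1 : (pvMod sd (b, x, w)).keys.Nodup := by
      rw [hkstep, List.nodup_append]
      exact ⟨hknd, List.nodup_singleton b, fun a ha b' hb' => by
        simp at hb'
        subst hb'
        exact fun he => hbnot (by rw [← he]; exact ha)⟩
    obtain ⟨hchi, hchk⟩ :=
      pvChunk_fold b es' (pvMod sd (b, x, w)) sd.items (PySem.Dict.empty.insert x w) hstep hknd1
    have hdec : (pvFlat ((b, (x, w) :: es') :: G')).foldl pvMod sd =
        (pvFlat G').foldl pvMod
          ((es'.map (fun p => (b, p.1, p.2))).foldl pvMod (pvMod sd (b, x, w))) := by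
      simp only [pvFlat, List.flatMap_cons, List.map_cons, List.foldl_append, List.foldl_cons]
    set sd2 := (es'.map (fun p => (b, p.1, p.2))).foldl pvMod (pvMod sd (b, x, w)) with hsd2
    have hk2 : sd2.keys = sd.keys ++ [b] := by rw [hchk, hkstep]
    have hknd2 : sd2.keys.Nodup := by rw [hchk]; exact hknd1
    have hbG' : b ∉ G'.map Prod.fst := by
      have := hnd
      simp only [List.map_cons] at this
      exact (List.nodup_cons.mp this).1
    have hfresh2 : ∀ q ∈ G', sd2.contains q.1 = false := by
      intro q hq
      rw [pvContains_false_iff, hk2]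
      intro hm
      rcases List.mem_append.mp hm with hm1 | hm2
      · exact (pvContains_false_iff sd q.1).mp (hfresh q (List.mem_cons_of_mem _ hq)) hm1
      · simp at hm2
        exact hbG' (by rw [← hm2]; exact List.mem_map_of_mem hq)
    have hnd2 : (G'.map Prod.fst).Nodup := by
      have := hnd
      simp only [List.map_cons] at this
      exact (List.nodup_cons.mp this).2
    have hih := ih sd2 (fun q hq => hgr q (List.mem_cons_of_mem _ hq)) hfresh2 hnd2 hknd2
    rw [hdec, hih]
    have hinner : (PySem.Dict.empty.insert x w).items = [(x, w)] := by
      rw [PySem.Dict.items_insert_of_not_contains _ _ (PySem.Dict.contains_empty x)]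
      rfl
    have hfold : (es'.foldl (fun dd p => dd.insert p.1 p.2) (PySem.Dict.empty.insert x w)).items =
        (x, w) :: es' := by
      have hfr : ∀ a ∈ es', (PySem.Dict.empty.insert x w).contains a.1 = false := by
        intro a ha
        rw [pvContains_false_iff]
        have hkx : (PySem.Dict.empty.insert x w).keys = [x] := by
          rw [PySem.Dict.keys_insert_of_not_contains _ _ (PySem.Dict.contains_empty x)]
          rfl
        rw [hkx]
        intro hm
        simp at hm
        have := hesnd
        simp only [List.map_cons] at this
        exact (List.nodup_cons.mp this).1 (hm ▸ List.mem_map_of_mem ha)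
      have := PySem.Dict.items_foldl_insert_fresh es' Prod.fst Prod.snd
        (PySem.Dict.empty.insert x w) hfr
        (by have := hesnd; simp only [List.map_cons] at this; exact (List.nodup_cons.mp this).2)
      rw [hinner] at this
      simpa using this
    rw [hchi]
    simp only [List.map_append, List.map_cons]
    rw [hfold]
    simp

-- ---- A's dict-threaded loops compute pvScan / pvAlist ----

theorem pvInnerFold (l : String) (bsCur : List (String × Int)) :
    ∀ (lend borr : PySem.Dict String Int) (sd : PySem.Dict String (PySem.Dict String Int)) (c : Int),
      (bsCur.map Prod.fst).Nodup →
      (∀ p ∈ bsCur, borr.getD p.1 0 = p.2) →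
      lend.getD l 0 = c →
      ∃ lend' borr',
        (bsCur.map Prod.fst).foldl (pvAInner l) (lend, borr, sd) =
          (lend', borr', ((pvScan c bsCur).1.map (fun p => (p.1, l, p.2))).foldl pvMod sd)
        ∧ (∀ p ∈ (pvScan c bsCur).2.1, borr'.getD p.1 0 = p.2)
        ∧ (∀ k, k ∉ bsCur.map Prod.fst → borr'.getD k 0 = borr.getD k 0)
        ∧ borr'.keys = borr.keys
        ∧ (∀ k, k ≠ l → lend'.getD k 0 = lend.getD k 0)
        ∧ lend'.keys = lend.keys := by
  induction bsCur with
  | nil =>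
    intro lend borr sd c _ _ _
    exact ⟨lend, borr, rfl, by simp [pvScan], fun _ _ => rfl, rfl, fun _ _ => rfl, rfl⟩
  | cons hd tl ih =>
    intro lend borr sd c hnd hb hl
    obtain ⟨b, d⟩ := hd
    have hnds : (b :: tl.map Prod.fst).Nodup := by simpa using hnd
    have hnd' := (List.nodup_cons.mp hnds).2
    have hbni := (List.nodup_cons.mp hnds).1
    have hdb : borr.getD b 0 = d := hb _ (List.mem_cons_self ..)
    simp only [List.map_cons, List.foldl_cons]
    by_cases hcd : c ≠ 0 ∧ d ≠ 0
    · have hlc : lend.contains l = true := pvContains_of_getD_ne _ _ (by rw [hl]; exact hcd.1)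
      have hbc : borr.contains b = true := pvContains_of_getD_ne _ _ (by rw [hdb]; exact hcd.2)
      by_cases hge : c ≥ d
      · have hstep : pvAInner l (lend, borr, sd) b =
            (lend.insert l (c - min c d), borr.insert b 0, pvMod sd (b, l, min c d)) := by
          simp only [pvAInner, pvMod]
          rw [hl, hdb, if_pos hcd, if_pos hge]
        rw [hstep]
        obtain ⟨lend', borr', heq, hbv, hbout, hbk, hlo, hlk⟩ :=
          ih (lend.insert l (c - min c d)) (borr.insert b 0) (pvMod sd (b, l, min c d))
            (c - min c d) hnd'
            (fun p hp => by
              rw [PySem.Dict.getD_insert_of_ne _ _ _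
                (fun he => hbni (by rw [← he]; exact List.mem_map_of_mem hp))]
              exact hb p (List.mem_cons_of_mem _ hp))
            (PySem.Dict.getD_insert_self _ _ _ _)
        have hscan : pvScan c ((b, d) :: tl) =
            ((b, min c d) :: (pvScan (c - min c d) tl).1,
             (b, 0) :: (pvScan (c - min c d) tl).2.1,
             (pvScan (c - min c d) tl).2.2) := by
          simp [pvScan, hcd.1, hcd.2, hge]
        refine ⟨lend', borr', ?_, ?_, ?_, ?_, ?_, ?_⟩
        · rw [heq, hscan]; simp [List.foldl_cons]
        · rw [hscan]
          intro p hp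
          rcases List.mem_cons.mp hp with h1 | h2
          · subst h1
            rw [hbout b hbni]
            exact PySem.Dict.getD_insert_self _ _ _ _
          · exact hbv p h2
        · intro k hk
          have hk1 : k ∉ tl.map Prod.fst := fun hm => hk (List.mem_cons_of_mem _ hm)
          have hk2 : k ≠ b := fun he => hk (by rw [he]; exact List.mem_cons_self ..)
          rw [hbout k hk1, PySem.Dict.getD_insert_of_ne _ _ _ hk2]
        · rw [hbk, PySem.Dict.keys_insert_of_contains _ _ hbc]
        · intro k hk
          rw [hlo k hk, PySem.Dict.getD_insert_of_ne _ _ _ hk]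
        · rw [hlk, PySem.Dict.keys_insert_of_contains _ _ hlc]
      · have hstep : pvAInner l (lend, borr, sd) b =
            (lend.insert l 0, borr.insert b (d - min c d), pvMod sd (b, l, min c d)) := by
          simp only [pvAInner, pvMod]
          rw [hl, hdb, if_pos hcd, if_neg hge]
        rw [hstep]
        obtain ⟨lend', borr', heq, hbv, hbout, hbk, hlo, hlk⟩ :=
          ih (lend.insert l 0) (borr.insert b (d - min c d)) (pvMod sd (b, l, min c d)) 0 hnd'
            (fun p hp => by
              rw [PySem.Dict.getD_insert_of_ne _ _ _
                (fun he => hbni (by rw [← he]; exact List.mem_map_of_mem hp))]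
              exact hb p (List.mem_cons_of_mem _ hp))
            (PySem.Dict.getD_insert_self _ _ _ _)
        have hscan : pvScan c ((b, d) :: tl) =
            ([(b, min c d)], (b, d - min c d) :: tl, 0) := by
          simp [pvScan, hcd.1, hcd.2, hge]
        refine ⟨lend', borr', ?_, ?_, ?_, ?_, ?_, ?_⟩
        · rw [heq, hscan]; simp [List.foldl_cons, pvScan_zero]
        · rw [hscan]
          intro p hp
          rcases List.mem_cons.mp hp with h1 | h2
          · subst h1
            rw [hbout b hbni]
            exact PySem.Dict.getD_insert_self _ _ _ _
          · exact hbv p (by rw [pvScan_zero]; exact h2)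
        · intro k hk
          have hk1 : k ∉ tl.map Prod.fst := fun hm => hk (List.mem_cons_of_mem _ hm)
          have hk2 : k ≠ b := fun he => hk (by rw [he]; exact List.mem_cons_self ..)
          rw [hbout k hk1, PySem.Dict.getD_insert_of_ne _ _ _ hk2]
        · rw [hbk, PySem.Dict.keys_insert_of_contains _ _ hbc]
        · intro k hk
          rw [hlo k hk, PySem.Dict.getD_insert_of_ne _ _ _ hk]
        · rw [hlk, PySem.Dict.keys_insert_of_contains _ _ hlc]
    · have hstep : pvAInner l (lend, borr, sd) b = (lend, borr, sd) := by
        simp only [pvAInner]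
        rw [hl, hdb, if_neg hcd]
      rw [hstep]
      obtain ⟨lend', borr', heq, hbv, hbout, hbk, hlo, hlk⟩ :=
        ih lend borr sd c hnd' (fun p hp => hb p (List.mem_cons_of_mem _ hp)) hl
      have hscan : pvScan c ((b, d) :: tl) =
          ((pvScan c tl).1, (b, d) :: (pvScan c tl).2.1, (pvScan c tl).2.2) := by
        simp [pvScan, hcd]
      refine ⟨lend', borr', ?_, ?_, ?_, ?_, ?_, ?_⟩
      · rw [heq, hscan]
      · rw [hscan]
        intro p hp
        rcases List.mem_cons.mp hp with h1 | h2
        · subst h1; rw [hbout b hbni]; exact hdb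
        · exact hbv p h2
      · intro k hk
        exact hbout k (fun hm => hk (List.mem_cons_of_mem _ hm))
      · exact hbk
      · exact hlo
      · exact hlk

theorem pvOuterFold (lsCur : List (String × Int)) :
    ∀ (lend borr : PySem.Dict String Int) (sd : PySem.Dict String (PySem.Dict String Int))
      (bsCur : List (String × Int)),
      (bsCur.map Prod.fst).Nodup →
      (∀ p ∈ bsCur, borr.getD p.1 0 = p.2) →
      (PySem.List.sorted borr.keys (fun k => k) false = bsCur.map Prod.fst) →
      (∀ p ∈ lsCur, lend.getD p.1 0 = p.2) →
      ((lsCur.map Prod.fst).Nodup) →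
      ((lsCur.map Prod.fst).foldl
          (fun st lender =>
            (PySem.List.sorted st.2.1.keys (fun k => k) false).foldl (pvAInner lender) st)
          (lend, borr, sd)).2.2 =
        (pvAlist bsCur lsCur).foldl pvMod sd := by
  induction lsCur with
  | nil =>
    intro lend borr sd bsCur _ _ _ _ _
    simp [pvAlist]
  | cons hd tl ih =>
    intro lend borr sd bsCur hbnd hbg hsk hlg hlnd
    obtain ⟨l, c⟩ := hd
    have hlnds : (l :: tl.map Prod.fst).Nodup := by simpa using hlnd
    simp only [List.map_cons, List.foldl_cons]
    obtain ⟨lend', borr', heq, hbv, hbout, hbk, hlo, hlk⟩ :=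
      pvInnerFold l bsCur lend borr sd c hbnd hbg (hlg _ (List.mem_cons_self ..))
    rw [hsk, heq]
    have hrec := ih lend' borr'
      (((pvScan c bsCur).1.map (fun p => (p.1, l, p.2))).foldl pvMod sd)
      ((pvScan c bsCur).2.1)
      (by rw [pvScan_keys]; exact hbnd)
      hbv
      (by rw [hbk, pvScan_keys]; exact hsk)
      (fun p hp => by
        have hne : p.1 ≠ l := fun he =>
          (List.nodup_cons.mp hlnds).1 (by rw [← he]; exact List.mem_map_of_mem hp)
        rw [hlo p.1 hne]
        exact hlg p (List.mem_cons_of_mem _ hp))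
      ((List.nodup_cons.mp hlnds).2)
    rw [hrec]
    simp only [pvAlist, List.foldl_append]

-- ---- B's indexed while-loop computes pvPayL, and its fold computes pvSweep ----

theorem pvCur_nil_of_ge (ls : List (String × Int)) (j : Nat) (c : Int) (h : ls.length ≤ j) :
    pvCur ls j c = [] := by
  simp [pvCur, List.getElem?_eq_none h]

theorem pvCur_of_lt (ls : List (String × Int)) (j : Nat) (c : Int) (h : j < ls.length) :
    pvCur ls j c = (ls[j].1, c) :: ls.drop (j + 1) := by
  simp [pvCur, List.getElem?_eq_getElem h]

theorem pvCur_next (ls : List (String × Int)) (j : Nat) (c : Int) :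
    pvCur ls (j + 1) (if h2 : j + 1 < ls.length then (ls[j + 1]'h2).2 else c) =
      ls.drop (j + 1) := by
  by_cases h : j + 1 < ls.length
  · rw [dif_pos h, pvCur_of_lt ls _ _ h]
    conv_rhs => rw [List.drop_eq_getElem_cons h]
  · rw [dif_neg h, pvCur_nil_of_ge ls _ _ (by omega), List.drop_eq_nil_of_le (by omega)]

theorem pvNodup_getElem_drop {α : Type} (K : List α) (j : Nat) (hj : j < K.length)
    (h : K.Nodup) : K[j] ∉ K.drop (j + 1) := by
  have hd : K.drop j = K[j] :: K.drop (j + 1) := List.drop_eq_getElem_cons hj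
  have hnd : (K.drop j).Nodup := (List.drop_sublist j K).nodup h
  rw [hd] at hnd
  exact (List.nodup_cons.mp hnd).1

theorem pvPay_spec (ls : List (String × Int)) (hls : (ls.map Prod.fst).Nodup) :
    ∀ (j : Nat) (c d : Int) (entries : PySem.Dict String Int),
      (∀ p ∈ (pvPayL d (pvCur ls j c)).1, entries.contains p.1 = false) →
      (pvPay ls j c d entries).1.items = entries.items ++ (pvPayL d (pvCur ls j c)).1
      ∧ pvCur ls (pvPay ls j c d entries).2.1 (pvPay ls j c d entries).2.2 =
          (pvPayL d (pvCur ls j c)).2.1 := by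
  intro j c d entries
  induction j, c, d, entries using pvPay.induct ls with
  | case1 j d entries h j' credit' ih =>
    have hj' : j' = j + 1 := rfl
    have hcr : credit' = if h2 : j + 1 < ls.length then (ls[j + 1]'h2).2 else 0 := rfl
    rw [hj', hcr] at ih
    intro hent
    have hjlt := h.2
    have hcur : pvCur ls j 0 = (ls[j].1, (0 : Int)) :: ls.drop (j + 1) := pvCur_of_lt ls j 0 hjlt
    have hred : pvPayL d (pvCur ls j 0) = pvPayL d (ls.drop (j + 1)) := by
      rw [hcur]; simp [pvPayL, h.1]
    have hnext : pvCur ls (j + 1) (if h2 : j + 1 < ls.length then (ls[j + 1]'h2).2 else 0) =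
        ls.drop (j + 1) := pvCur_next ls j 0
    have hstep : pvPay ls j 0 d entries =
        pvPay ls (j + 1) (if h2 : j + 1 < ls.length then (ls[j + 1]'h2).2 else 0) d entries := by
      rw [pvPay]
      rw [dif_pos h, dif_pos rfl]
    rw [hstep, hred, ← hnext]
    exact ih (by rw [hnext, ← hred]; exact hent)
  | case2 j c d entries h hc hge =>
    intro hent
    have hjlt := h.2
    have hcur : pvCur ls j c = (ls[j].1, c) :: ls.drop (j + 1) := pvCur_of_lt ls j c hjlt
    have hpayl : pvPayL d (pvCur ls j c) =
        ([(ls[j].1, min c d)], (ls[j].1, c - min c d) :: ls.drop (j + 1), 0) := by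
      rw [hcur]; simp [pvPayL, h.1, hc, hge]
    have hstep : pvPay ls j c d entries = (entries.insert ls[j].1 (min c d), j, c - min c d) := by
      rw [pvPay]
      rw [dif_pos h, dif_neg hc, if_pos hge]
    rw [hstep, hpayl]
    constructor
    · exact PySem.Dict.items_insert_of_not_contains _ _
        (hent (ls[j].1, min c d) (by simp [hpayl]))
    · exact pvCur_of_lt ls j _ hjlt
  | case3 j c d entries h hc value entries' hnge ih =>
    have hv : value = min c d := rfl
    have hee : entries' = entries.insert ls[j].1 (min c d) := by rw [← hv]
    rw [hv, hee] at ih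
    intro hent
    have hjlt := h.2
    have hlt : c < d := lt_of_not_ge hnge
    have hmin : min c d = c := min_eq_left (le_of_lt hlt)
    have hcur : pvCur ls j c = (ls[j].1, c) :: ls.drop (j + 1) := pvCur_of_lt ls j c hjlt
    have hpayl : pvPayL d (pvCur ls j c) =
        ((ls[j].1, min c d) :: (pvPayL (d - min c d) (ls.drop (j + 1))).1,
         (pvPayL (d - min c d) (ls.drop (j + 1))).2.1,
         (pvPayL (d - min c d) (ls.drop (j + 1))).2.2) := by
      rw [hcur]
      simp [pvPayL, h.1, hc, hnge]
    have hdv : d - min c d ≠ 0 := by rw [hmin]; omega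
    have hcur0 : pvCur ls j 0 = (ls[j].1, (0 : Int)) :: ls.drop (j + 1) := pvCur_of_lt ls j 0 hjlt
    have hred : pvPayL (d - min c d) (pvCur ls j 0) =
        pvPayL (d - min c d) (ls.drop (j + 1)) := by
      rw [hcur0]; simp [pvPayL, hdv]
    have hstep : pvPay ls j c d entries =
        pvPay ls j 0 (d - min c d) (entries.insert ls[j].1 (min c d)) := by
      rw [pvPay]
      rw [dif_pos h, dif_neg hc, if_neg hnge]
    have hhead : entries.contains ls[j].1 = false :=
      hent (ls[j].1, min c d) (by simp [hpayl])
    have hlnotin : ls[j].1 ∉ (ls.drop (j + 1)).map Prod.fst := by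
      rw [List.map_drop]
      have := pvNodup_getElem_drop (ls.map Prod.fst) j (by simpa using hjlt) hls
      simpa using this
    have hent' : ∀ p ∈ (pvPayL (d - min c d) (pvCur ls j 0)).1,
        (entries.insert ls[j].1 (min c d)).contains p.1 = false := by
      intro p hp
      rw [hred] at hp
      have hkey : p.1 ∈ (ls.drop (j + 1)).map Prod.fst :=
        (pvPayL_es_keys _ _).subset (List.mem_map_of_mem hp)
      have hne : p.1 ≠ ls[j].1 := fun he => hlnotin (by rw [← he]; exact hkey)
      have h1 : entries.contains p.1 = false :=
        hent p (by rw [hpayl]; exact List.mem_cons_of_mem _ hp)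
      rw [PySem.Dict.contains_insert]
      simp [hne, h1]
    obtain ⟨hi1, hi2⟩ := ih hent'
    rw [hstep]
    constructor
    · rw [hi1, hred, hpayl, PySem.Dict.items_insert_of_not_contains _ _ hhead]
      simp
    · rw [hi2, hred, hpayl]
  | case4 j c d entries h =>
    intro _
    have hstep : pvPay ls j c d entries = (entries, j, c) := by
      rw [pvPay]; rw [dif_neg h]
    rw [hstep]
    by_cases hd : d = 0
    · subst hd
      rcases hc : pvCur ls j c with _ | ⟨⟨pl, pc⟩, rest⟩
      · exact ⟨by simp [pvPayL], by simp [pvPayL]⟩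
      · exact ⟨by simp [pvPayL], by simp [pvPayL]⟩
    · have hge : ls.length ≤ j := by
        by_contra hlt
        exact h ⟨hd, by omega⟩
      rw [pvCur_nil_of_ge ls j c hge]
      exact ⟨by simp [pvPayL], by simp [pvPayL]⟩

theorem pvBFold (ls : List (String × Int)) (hls : (ls.map Prod.fst).Nodup)
    (bs : List (String × Int)) :
    ∀ (res : PySem.Dict String (PySem.Dict String Int)) (j : Nat) (c : Int),
      (bs.map Prod.fst).Nodup →
      (∀ b ∈ bs.map Prod.fst, res.contains b = false) →
      ((bs.foldl
          (fun (st : PySem.Dict String (PySem.Dict String Int) × Nat × Int) nd =>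
            let r := pvPay ls st.2.1 st.2.2 nd.2 PySem.Dict.empty
            (if r.1.size ≠ 0 then st.1.insert nd.1 r.1 else st.1, r.2))
          (res, j, c)).1.items.map (fun p => (p.1, p.2.items))) =
        res.items.map (fun p => (p.1, p.2.items)) ++ pvSweep bs (pvCur ls j c) := by
  induction bs with
  | nil => intro res j c _ _; simp [pvSweep]
  | cons nd bs' ih =>
    intro res j c hnd hfr
    obtain ⟨b, d⟩ := nd
    have hnds : (b :: bs'.map Prod.fst).Nodup := by simpa using hnd
    have hfrb : res.contains b = false := hfr b (by simp)
    simp only [List.foldl_cons]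
    obtain ⟨hp1, hp2⟩ := pvPay_spec ls hls j c d PySem.Dict.empty
      (fun p _ => PySem.Dict.contains_empty p.1)
    have hitems : (pvPay ls j c d PySem.Dict.empty).1.items = (pvPayL d (pvCur ls j c)).1 := by
      rw [hp1]; rfl
    by_cases hesz : (pvPayL d (pvCur ls j c)).1 = []
    · have hsz : ¬ ((pvPay ls j c d PySem.Dict.empty).1.size ≠ 0) := by
        simp [PySem.Dict.size, hitems, hesz]
      rw [if_neg hsz]
      have hihx := ih res (pvPay ls j c d PySem.Dict.empty).2.1
        (pvPay ls j c d PySem.Dict.empty).2.2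
        (List.nodup_cons.mp hnds).2 (fun b' hb' => hfr b' (List.mem_cons_of_mem _ hb'))
      rw [hihx, hp2]
      have hsw : pvSweep ((b, d) :: bs') (pvCur ls j c) =
          pvSweep bs' (pvPayL d (pvCur ls j c)).2.1 := by
        simp [pvSweep, hesz]
      rw [hsw]
    · have hsz : (pvPay ls j c d PySem.Dict.empty).1.size ≠ 0 := by
        simp [PySem.Dict.size, hitems, hesz]
      rw [if_pos hsz]
      have hfr' : ∀ b' ∈ bs'.map Prod.fst,
          (res.insert b (pvPay ls j c d PySem.Dict.empty).1).contains b' = false := by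
        intro b' hb'
        have hne : b' ≠ b := fun he => (List.nodup_cons.mp hnds).1 (by rw [← he]; exact hb')
        rw [PySem.Dict.contains_insert]
        simp [hne, hfr b' (List.mem_cons_of_mem _ hb')]
      have hihx := ih (res.insert b (pvPay ls j c d PySem.Dict.empty).1)
        (pvPay ls j c d PySem.Dict.empty).2.1 (pvPay ls j c d PySem.Dict.empty).2.2
        (List.nodup_cons.mp hnds).2 hfr'
      rw [hihx, hp2]
      have hins : (res.insert b (pvPay ls j c d PySem.Dict.empty).1).items =
          res.items ++ [(b, (pvPay ls j c d PySem.Dict.empty).1)] :=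
        PySem.Dict.items_insert_of_not_contains _ _ hfrb
      have hsw : pvSweep ((b, d) :: bs') (pvCur ls j c) =
          (b, (pvPayL d (pvCur ls j c)).1) :: pvSweep bs' (pvPayL d (pvCur ls j c)).2.1 := by
        simp [pvSweep, hesz]
      rw [hsw, hins]
      simp [hitems]

-- ---- sorted-items setup for a dict built from an input list ----

theorem pvSorted_setup (xs : List (String × Int)) :
    ((PySem.List.sorted (PySem.Dict.ofList xs).items (fun kv => kv.1) false).map Prod.fst).Nodup
    ∧ PySem.List.sorted (PySem.Dict.ofList xs).keys (fun k => k) false =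
        (PySem.List.sorted (PySem.Dict.ofList xs).items (fun kv => kv.1) false).map Prod.fst
    ∧ ∀ p ∈ PySem.List.sorted (PySem.Dict.ofList xs).items (fun kv => kv.1) false,
        (PySem.Dict.ofList xs).getD p.1 0 = p.2 := by
  have hknd : (PySem.Dict.ofList xs).keys.Nodup := PySem.Dict.nodup_keys_ofList xs
  have hperm : (PySem.List.sorted (PySem.Dict.ofList xs).items (fun kv => kv.1) false).Perm
      (PySem.Dict.ofList xs).items := PySem.List.sorted_perm _ _ _
  have hmapperm : ((PySem.List.sorted (PySem.Dict.ofList xs).items (fun kv => kv.1) false).map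
      Prod.fst).Perm (PySem.Dict.ofList xs).keys := hperm.map Prod.fst
  have hnd : ((PySem.List.sorted (PySem.Dict.ofList xs).items (fun kv => kv.1) false).map
      Prod.fst).Nodup := hmapperm.nodup_iff.mpr hknd
  refine ⟨hnd, ?_, ?_⟩
  · apply PySem.List.sorted_eq_of_perm_of_pairwise_lt
    · exact hmapperm
    · have hle := PySem.List.sorted_map_key_pairwise (PySem.Dict.ofList xs).items
        (fun kv => kv.1)
      exact (List.Pairwise.and hle hnd).imp (fun h => lt_of_le_of_ne h.1 h.2)
  · intro p hp
    have hpi : p ∈ (PySem.Dict.ofList xs).items := (PySem.List.mem_sorted _ _ _ _).mp hp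
    exact PySem.Dict.getD_of_mem_items (PySem.Dict.ofList xs)
      (by simpa using hpi) hknd 0

theorem pvA_eq_sweep (borrowers lenders : List (String × Int)) :
    debt_simplification borrowers lenders =
      pvSweep (PySem.List.sorted (PySem.Dict.ofList borrowers).items (fun kv => kv.1) false)
        (PySem.List.sorted (PySem.Dict.ofList lenders).items (fun kv => kv.1) false) := by
  obtain ⟨hbnd, hbsk, hbget⟩ := pvSorted_setup borrowers
  obtain ⟨hlnd, hlsk, hlget⟩ := pvSorted_setup lenders
  simp only [debt_simplification]
  rw [hlsk]
  rw [pvOuterFold _ _ _ _ _ hbnd hbget hbsk hlget hlnd]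
  rw [pvAlist_eq_flat_sweep _ _ hbnd]
  rw [pvModFold_items _ _ (fun q hq => pvSweep_groups _ _ hlnd q hq)
    (fun q _ => PySem.Dict.contains_empty q.1)
    ((pvSweep_keys _ _).nodup hbnd)
    (by rw [PySem.Dict.keys_empty]; exact List.nodup_nil)]
  simp [pvEmptyItems]

theorem pvB_eq_sweep (borrowers lenders : List (String × Int)) :
    debt_simplification_alt borrowers lenders =
      pvSweep (PySem.List.sorted (PySem.Dict.ofList borrowers).items (fun kv => kv.1) false)
        (PySem.List.sorted (PySem.Dict.ofList lenders).items (fun kv => kv.1) false) := by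
  obtain ⟨hbnd, hbsk, hbget⟩ := pvSorted_setup borrowers
  obtain ⟨hlnd, hlsk, hlget⟩ := pvSorted_setup lenders
  simp only [debt_simplification_alt]
  rw [pvBFold _ hlnd _ _ _ _ hbnd (fun b _ => PySem.Dict.contains_empty b)]
  have hcur0 : pvCur (PySem.List.sorted (PySem.Dict.ofList lenders).items (fun kv => kv.1) false)
      0 (if h : 0 < (PySem.List.sorted (PySem.Dict.ofList lenders).items (fun kv => kv.1)
            false).length then
          ((PySem.List.sorted (PySem.Dict.ofList lenders).items (fun kv => kv.1) false)[0]'h).2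
        else 0) =
      PySem.List.sorted (PySem.Dict.ofList lenders).items (fun kv => kv.1) false := by
    set L := PySem.List.sorted (PySem.Dict.ofList lenders).items (fun kv => kv.1) false with hL
    by_cases h : 0 < L.length
    · rw [dif_pos h, pvCur_of_lt L 0 _ h]
      conv_rhs => rw [show L = L.drop 0 from List.drop_zero.symm, List.drop_eq_getElem_cons h]
    · rw [dif_neg h, pvCur_nil_of_ge L 0 _ (by omega)]
      rcases L with _ | ⟨x, L'⟩
      · rfl
      · exact absurd (by simp) h
  rw [hcur0]
  simp [pvEmptyItems]

-- ===== VERDICT (by name: the statement is the Claim_ definition above) =====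
theorem debt_simplification_spec : Claim_equal_debt_simplification := by
  intro borrowers lenders _
  unfold Spec_debt_simplification
  rw [pvA_eq_sweep, pvB_eq_sweep]
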